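-- pv_equiv track=rewrite | github.com/Otter-Girl/ttool | ttool.py | blocktoolong
-- ===== SOURCE A (Python) =====
-- def blocktoolong(block, index = 0):
--     temp = []
--     indexold = index
--     while index != -1:
--         indexold = index
--         index = block.find('\n', index + 450)
--         temp.append(block[indexold:index])
--     return temp
-- ===== SOURCE B (Python) =====
-- def blocktoolong(block, index=0):
--     # Pre-index all newline positions once, then find each cut with a binary
--     # search over that index instead of scanning the text with str.find.
--     nls = [i for i, c in enumerate(block) if c == '\n']
--     n = len(block)
--     out = []
--     while index != -1:
--         start = index
--         s = index + 450
--         if s < 0: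
--             s += n
--             if s < 0:
--                 s = 0
--         lo, hi = 0, len(nls)
--         while lo < hi:
--             mid = (lo + hi) // 2
--             if nls[mid] < s:
--                 lo = mid + 1
--             else:
--                 hi = mid
--         index = nls[lo] if lo < len(nls) else -1
--         out.append(block[start:index])
--     return out
-- ===== Notes on version B (the rewrite author's own statement) =====
-- stated objective: alternative
-- what changed: B replaces A's repeated str.find scans with a different data structure: it builds an index of all newline positions once, then locates each cut with a hand-written binary search over that index (with Python's find start-clamping done arithmetically), so no text scanning happens inside the chunking loop.
import Mathlib
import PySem

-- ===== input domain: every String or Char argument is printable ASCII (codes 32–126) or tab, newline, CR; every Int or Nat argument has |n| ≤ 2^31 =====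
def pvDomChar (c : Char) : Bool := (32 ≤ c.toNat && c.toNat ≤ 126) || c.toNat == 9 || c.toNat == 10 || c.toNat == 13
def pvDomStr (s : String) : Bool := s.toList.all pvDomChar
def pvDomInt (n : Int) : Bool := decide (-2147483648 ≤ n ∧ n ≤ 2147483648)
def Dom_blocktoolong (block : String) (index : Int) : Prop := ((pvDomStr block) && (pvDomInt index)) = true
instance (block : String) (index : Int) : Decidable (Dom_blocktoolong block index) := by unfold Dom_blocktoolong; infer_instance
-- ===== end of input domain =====

-- B replaces A's repeated str.find scans by a newline-position index built once
-- plus a binary search per cut ('alternative', not measured faster).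
-- Both loops recurse on a fuel counter (block length + 3, provably more iterations than
-- either while loop can make); fuel is only a totality guard, not part of the algorithm.

-- ===== PORT A =====
def blocktoolongLoop (block : String) (fuel : Nat) (index : Int) (temp : List String) : List String :=
  match fuel with
  | 0 => temp
  | fuel + 1 =>
    if index = -1 then temp
    else
      let indexold := index
      let index' := PySem.Str.findFrom block "\n" (index + 450) none
      blocktoolongLoop block fuel index' (temp ++ [PySem.Str.slice block (some indexold) (some index')])

def blocktoolong (block : String) (index : Int) : List String :=
  blocktoolongLoop block (block.toList.length + 3) index []

-- ===== PORT B =====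
-- nls = [i for i, c in enumerate(block) if c == '\n']  (the newline-position index)
def pvNls (cs : List Char) : List Int :=
  ((PySem.List.enumerate cs).filter (fun p => p.2 == '\n')).map Prod.fst

-- small-term arithmetic for the binary search's termination (cited in decreasing_by)
theorem pvMidLt (lo hi : Nat) (h : lo < hi) : (lo + hi) / 2 < hi :=
  Nat.div_lt_iff_lt_mul Nat.two_pos |>.mpr (by rw [Nat.mul_two]; exact Nat.add_lt_add_right h hi)
theorem pvLeMid (lo hi : Nat) (h : lo ≤ hi) : lo ≤ (lo + hi) / 2 :=
  Nat.le_div_iff_mul_le Nat.two_pos |>.mpr (by rw [Nat.mul_two]; exact Nat.add_le_add_left h lo)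
theorem pvBsearchDec (c : Prop) [Decidable c] (lo hi : Nat) (h : lo < hi) :
    (if c then hi else (lo + hi) / 2) - (if c then (lo + hi) / 2 + 1 else lo) < hi - lo := by
  by_cases hc : c
  · rw [if_pos hc, if_pos hc]
    exact Nat.sub_lt_sub_left h (Nat.lt_succ_of_le (pvLeMid lo hi (Nat.le_of_lt h)))
  · rw [if_neg hc, if_neg hc]
    exact Nat.sub_lt_sub_right (pvLeMid lo hi (Nat.le_of_lt h)) (pvMidLt lo hi h)

-- Source B's inner `while lo < hi` binary search, transcribed as one step on the
-- state (lo, hi): the branch picks the next lo and the next hi (mid = (lo+hi)//2 inline)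
def pvBsearch (nls : List Int) (s : Int) (lo hi : Nat) : Nat :=
  if lo < hi then
    pvBsearch nls s
      (if nls.getD ((lo + hi) / 2) 0 < s then (lo + hi) / 2 + 1 else lo)
      (if nls.getD ((lo + hi) / 2) 0 < s then hi else (lo + hi) / 2)
  else lo
termination_by hi - lo
decreasing_by exact pvBsearchDec _ lo hi (by assumption)

-- one body of Source B's outer loop: clamp the search start like str.find, then binary-search
def pvBNext (n : Int) (nls : List Int) (index : Int) : Int :=
  let s0 := index + 450
  let s := if s0 < 0 then (if s0 + n < 0 then 0 else s0 + n) else s0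
  let lo := pvBsearch nls s 0 nls.length
  if lo < nls.length then nls.getD lo 0 else -1

-- Source B's outer loop; nls is the index built once before the loop (pvNls block.toList)
def blocktoolongAltLoop (block : String) (fuel : Nat) (index : Int) (out : List String) : List String :=
  match fuel with
  | 0 => out
  | fuel + 1 =>
    if index = -1 then out
    else
      let start := index
      let index' := pvBNext (block.toList.length : Int) (pvNls block.toList) index
      blocktoolongAltLoop block fuel index' (out ++ [PySem.Str.slice block (some start) (some index')])

def blocktoolong_alt (block : String) (index : Int) : List String :=
  blocktoolongAltLoop block (block.toList.length + 3) index []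

-- ===== PRECONDITION & SPEC =====
def Spec_blocktoolong (block : String) (index : Int) (out : List String) : Prop := out = blocktoolong_alt block index
instance (block : String) (index : Int) (out : List String) : Decidable (Spec_blocktoolong block index out) := by unfold Spec_blocktoolong; infer_instance

-- ===== CLAIM (what is proved, stated in full; the proofs are below) =====
def Claim_equal_blocktoolong : Prop := ∀ (block : String) (index : Int), Dom_blocktoolong block index → Spec_blocktoolong block index (blocktoolong block index)

-- ===== LEMMAS AND PROOFS =====
theorem pvGetDLt (l : List Int) (hs : l.Pairwise (· < ·)) (i j : Nat) (hij : i < j)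
    (hj : j < l.length) : l.getD i 0 < l.getD j 0 := by
  have h := List.pairwise_iff_getElem.mp hs i j (lt_trans hij hj) hj hij
  rw [List.getD_eq_getElem l 0 (lt_trans hij hj), List.getD_eq_getElem l 0 hj]
  exact h

theorem pvBsearch_spec (nls : List Int) (hs : nls.Pairwise (· < ·)) (s : Int) (lo hi : Nat)
    (h1 : lo ≤ hi) (h2 : hi ≤ nls.length)
    (hb : ∀ q, q < lo → nls.getD q 0 < s)
    (ha : ∀ q, hi ≤ q → q < nls.length → s ≤ nls.getD q 0) :
    (∀ q, q < pvBsearch nls s lo hi → nls.getD q 0 < s) ∧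
      (∀ q, pvBsearch nls s lo hi ≤ q → q < nls.length → s ≤ nls.getD q 0) ∧
      pvBsearch nls s lo hi ≤ nls.length := by
  induction lo, hi using pvBsearch.induct (nls := nls) (s := s) with
  | case1 lo hi hlt ih =>
    rw [pvBsearch, if_pos hlt]
    by_cases hm : nls.getD ((lo + hi) / 2) 0 < s
    · simp only [dif_pos hm, if_pos hm] at ih ⊢
      exact ih (by omega) h2
        (fun q hq => by
          rcases lt_or_ge q ((lo + hi) / 2) with hcase | hcase
          · rcases lt_or_ge q lo with hcl | hcl
            · exact hb q hcl
            · exact lt_trans (pvGetDLt nls hs q ((lo + hi) / 2) hcase (by omega)) hm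
          · have : q = (lo + hi) / 2 := by omega
            rw [this]; exact hm)
        ha
    · simp only [dif_neg hm, if_neg hm] at ih ⊢
      exact ih (by omega) (by omega) hb
        (fun q hq hql => by
          rcases eq_or_lt_of_le hq with hcase | hcase
          · rw [← hcase]; exact le_of_not_gt hm
          · exact le_trans (le_of_not_gt hm) (le_of_lt (pvGetDLt nls hs ((lo + hi) / 2) q hcase hql)))
  | case2 lo hi hlt =>
    rw [pvBsearch, if_neg hlt]
    exact ⟨hb, fun q hq hql => ha q (by omega) hql, by omega⟩

theorem pvMemEnumerate {α : Type} (xs : List α) (st : Int) (p : Int × α) :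
    p ∈ PySem.List.enumerate xs st ↔ ∃ j : Nat, p.1 = st + j ∧ xs[j]? = some p.2 := by
  induction xs generalizing st with
  | nil => simp [PySem.List.enumerate]
  | cons x t ih =>
    simp only [PySem.List.enumerate, List.mem_cons, ih]
    constructor
    · rintro (rfl | ⟨j, hj1, hj2⟩)
      · exact ⟨0, by simp⟩
      · exact ⟨j + 1, by push_cast at hj1 ⊢; omega, by simpa using hj2⟩
    · rintro ⟨j, hj1, hj2⟩
      cases j with
      | zero =>
        left
        simp only [List.getElem?_cons_zero, Option.some.injEq] at hj2
        simp only [Nat.cast_zero, add_zero] at hj1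
        exact Prod.ext hj1 hj2.symm
      | succ j' =>
        right
        exact ⟨j', by push_cast at hj1 ⊢; omega, by simpa using hj2⟩

theorem pvMemNls (cs : List Char) (x : Int) :
    x ∈ pvNls cs ↔ 0 ≤ x ∧ cs[x.toNat]? = some '\n' := by
  simp only [pvNls, List.mem_map, List.mem_filter]
  constructor
  · rintro ⟨p, ⟨hp, hnl⟩, rfl⟩
    obtain ⟨j, hj1, hj2⟩ := (pvMemEnumerate cs 0 p).mp hp
    have hpc : p.2 = '\n' := by simpa using hnl
    rw [hpc] at hj2
    refine ⟨by omega, ?_⟩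
    have : p.1.toNat = j := by omega
    rw [this]; exact hj2
  · rintro ⟨hx0, hx⟩
    refine ⟨(x, '\n'), ⟨?_, by simp⟩, rfl⟩
    exact (pvMemEnumerate cs 0 (x, '\n')).mpr ⟨x.toNat, by omega, hx⟩

theorem pvEnumerateFstGe {α : Type} (xs : List α) (st : Int) :
    ∀ p ∈ PySem.List.enumerate xs st, st ≤ p.1 := by
  induction xs generalizing st with
  | nil => simp [PySem.List.enumerate]
  | cons x t ih =>
    intro p hp
    simp only [PySem.List.enumerate, List.mem_cons] at hp
    rcases hp with rfl | hp
    · exact le_refl _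
    · have := ih (st + 1) p hp; omega

theorem pvEnumeratePairwise {α : Type} (xs : List α) (st : Int) :
    (PySem.List.enumerate xs st).Pairwise (fun p q => p.1 < q.1) := by
  induction xs generalizing st with
  | nil => simp [PySem.List.enumerate]
  | cons x t ih =>
    simp only [PySem.List.enumerate]
    exact List.Pairwise.cons
      (fun q hq => by have := pvEnumerateFstGe t (st + 1) q hq; simp; omega) (ih (st + 1))

theorem pvNlsPairwise (cs : List Char) : (pvNls cs).Pairwise (· < ·) := by
  unfold pvNls
  rw [List.pairwise_map]
  exact (pvEnumeratePairwise cs 0).filter _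

theorem pvNlsBounds (cs : List Char) (x : Int) (hx : x ∈ pvNls cs) :
    0 ≤ x ∧ x < (cs.length : Int) := by
  obtain ⟨h0, hget⟩ := (pvMemNls cs x).mp hx
  obtain ⟨hlt, -⟩ := List.getElem?_eq_some_iff.mp hget
  omega

def firstGE : List Int → Int → Int
  | [], _ => -1
  | x :: t, s => if s ≤ x then x else firstGE t s

theorem firstGE_neg_one (l : List Int) (s : Int) (h : ∀ x ∈ l, x < s) : firstGE l s = -1 := by
  induction l with
  | nil => rfl
  | cons x t ih =>
    rw [firstGE, if_neg (by have := h x (by simp); omega)]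
    exact ih (fun y hy => h y (by simp [hy]))

theorem firstGE_eq (l : List Int) (s r : Int) (hs : l.Pairwise (· < ·)) (hmem : r ∈ l)
    (hsr : s ≤ r) (hmin : ∀ x ∈ l, s ≤ x → r ≤ x) : firstGE l s = r := by
  induction l with
  | nil => simp at hmem
  | cons x t ih =>
    rw [firstGE]
    rcases List.mem_cons.mp hmem with rfl | hrt
    · rw [if_pos hsr]
    · have hxr : x < r := (List.pairwise_cons.mp hs).1 r hrt
      by_cases hsx : s ≤ x
      · exact absurd (hmin x (by simp) hsx) (by omega)
      · rw [if_neg hsx]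
        exact ih (List.pairwise_cons.mp hs).2 hrt
          (fun y hy hsy => hmin y (by simp [hy]) hsy)

theorem firstGE_of_index (l : List Int) (s : Int) (r : Nat)
    (hb : ∀ q, q < r → l.getD q 0 < s) (ha : r < l.length → s ≤ l.getD r 0) :
    firstGE l s = if r < l.length then l.getD r 0 else -1 := by
  induction l generalizing r with
  | nil => simp [firstGE]
  | cons x t ih =>
    cases r with
    | zero =>
      have hsx : s ≤ x := by simpa using ha (by simp)
      simp [firstGE, hsx]
    | succ r' =>
      have hx : x < s := by simpa using hb 0 (by omega)
      rw [firstGE, if_neg (by omega)]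
      rw [ih r' (fun q hq => by simpa using hb (q + 1) (by omega))
        (fun hl => by simpa using ha (by simpa using hl))]
      simp

-- ['\n'] is a prefix of cs.drop j exactly when cs[j] is '\n'
theorem pvPrefixDrop (cs : List Char) (j : Nat) :
    ['\n'] <+: cs.drop j ↔ cs[j]? = some '\n' := by
  rw [← List.head?_drop]
  cases h : cs.drop j with
  | nil => simp
  | cons a t => simp [List.cons_prefix_cons, eq_comm]

-- core: the find-from-k result expressed through the newline index
theorem pvFindCore (cs : List Char) (k : Nat) :
    (if PySem.Chars.find (cs.drop k) ['\n'] = -1 then -1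
      else (k : Int) + PySem.Chars.find (cs.drop k) ['\n']) = firstGE (pvNls cs) (k : Int) := by
  set f := cs.drop k with hf
  by_cases h : PySem.Chars.find f ['\n'] = -1
  · rw [if_pos h]
    symm
    apply firstGE_neg_one
    intro x hx
    by_contra hxk
    obtain ⟨hx0, hget⟩ := (pvMemNls cs x).mp hx
    have hpre : ['\n'] <+: f.drop (x.toNat - k) := by
      rw [hf, List.drop_drop]
      have : k + (x.toNat - k) = x.toNat := by omega
      rw [this]
      exact (pvPrefixDrop cs x.toNat).mpr hget
    have hin : PySem.Chars.isIn ['\n'] f = true :=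
      (PySem.Chars.exists_prefix_drop_iff_isIn ['\n'] f).mp ⟨x.toNat - k, hpre⟩
    have := (PySem.Chars.find_eq_neg_one_iff f ['\n']).mp h
    exact this ((PySem.Chars.isIn_iff_infix ['\n'] f).mp hin)
  · have h0 : 0 ≤ PySem.Chars.find f ['\n'] := by
      have := PySem.Chars.neg_one_le_find f ['\n']; omega
    obtain ⟨hpre, hmin⟩ := PySem.Chars.find_spec h0
    rw [if_neg h]
    set r0 := PySem.Chars.find f ['\n'] with hr0
    symm
    apply firstGE_eq _ _ _ (pvNlsPairwise cs)
    · rw [pvMemNls]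
      refine ⟨by omega, ?_⟩
      rw [hf, List.drop_drop] at hpre
      have hgt : ((k : Int) + r0).toNat = k + r0.toNat := by omega
      rw [hgt]
      exact (pvPrefixDrop cs (k + r0.toNat)).mp hpre
    · omega
    · intro x hx hkx
      obtain ⟨hx0, hget⟩ := (pvMemNls cs x).mp hx
      by_contra hlt
      have hidx : x.toNat - k < r0.toNat := by omega
      apply hmin (x.toNat - k) hidx
      rw [hf, List.drop_drop]
      have : k + (x.toNat - k) = x.toNat := by omega
      rw [this]
      exact (pvPrefixDrop cs x.toNat).mpr hget

-- findFrom with an arbitrary int start = firstGE of the newline index at the clamped start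
theorem pvFindFromChar (cs : List Char) (a : Int) :
    PySem.Chars.findFrom cs ['\n'] a none =
      firstGE (pvNls cs)
        (if a < 0 then (if a + (cs.length : Int) < 0 then 0 else a + cs.length) else a) := by
  have htake : (((cs.length : Int)).toNat) = cs.length := by omega
  have hnl : ∀ x ∈ pvNls cs, x < (cs.length : Int) := fun x hx => (pvNlsBounds cs x hx).2
  simp only [PySem.Chars.findFrom]
  by_cases h1 : a < 0
  · by_cases h2 : a + (cs.length : Int) < 0
    · simp only [if_pos h1, if_pos h2]
      rw [if_neg (by omega), htake, List.take_length]
      have := pvFindCore cs 0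
      simpa using this
    · simp only [if_pos h1, if_neg h2]
      rw [if_neg (by omega), htake, List.take_length]
      have := pvFindCore cs (a + (cs.length : Int)).toNat
      rw [Int.toNat_of_nonneg (by omega)] at this
      exact this
  · simp only [if_neg h1]
    by_cases h3 : (cs.length : Int) < a
    · rw [if_pos h3]
      symm
      exact firstGE_neg_one _ _ (fun x hx => by have := hnl x hx; omega)
    · rw [if_neg h3, htake, List.take_length]
      have := pvFindCore cs a.toNat
      rw [Int.toNat_of_nonneg (by omega)] at this
      exact this

-- B's next-cut computation agrees with A's str.find
theorem pvNextEq (block : String) (index : Int) :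
    pvBNext (block.toList.length : Int) (pvNls block.toList) index =
      PySem.Str.findFrom block "\n" (index + 450) none := by
  rw [PySem.Str.findFrom_eq]
  have htl : ("\n" : String).toList = ['\n'] := by decide
  rw [htl, pvFindFromChar]
  set cs := block.toList with hcs
  set nls := pvNls cs with hnls
  set s := (if index + 450 < 0 then (if index + 450 + (cs.length : Int) < 0 then 0
    else index + 450 + cs.length) else index + 450) with hsdef
  obtain ⟨hlow, hhigh, hlen⟩ := pvBsearch_spec nls (pvNlsPairwise cs) s 0 nls.length
    (by omega) (le_refl _) (fun q hq => by omega) (fun q hq hql => by omega)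
  simp only [pvBNext, ← hsdef]
  exact (firstGE_of_index nls s (pvBsearch nls s 0 nls.length) hlow
    (fun hl => hhigh _ (le_refl _) hl)).symm

theorem pvLoopEq (block : String) (fuel : Nat) (index : Int) (temp : List String) :
    blocktoolongLoop block fuel index temp = blocktoolongAltLoop block fuel index temp := by
  induction fuel generalizing index temp with
  | zero => rfl
  | succ f ih =>
    rw [blocktoolongLoop, blocktoolongAltLoop]
    by_cases h : index = -1
    · rw [if_pos h, if_pos h]
    · rw [if_neg h, if_neg h]
      simp only [← pvNextEq block index]
      exact ih _ _

-- ===== VERDICT (by name: the statement is the Claim_ definition above) =====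
theorem blocktoolong_spec : Claim_equal_blocktoolong := by
  intro block index _
  show blocktoolong block index = blocktoolong_alt block index
  rw [blocktoolong, blocktoolong_alt, pvLoopEq]
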